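-- pv_equiv track=rewrite | github.com/zuuky/jetbrains_plugin | sweep_autocomplete_servers/autocomplete/next_edit_autocomplete_utils.py | keep_only_changing_lines
-- ===== SOURCE A (Python) =====
-- def keep_only_changing_lines(changes: str) -> str:
--     if not changes:
--         return ""
--
--     hunks = changes.split("\n@@")
--
--     processed_hunks = []
--     for i, hunk in enumerate(hunks):
--         if not hunk.strip():
--             continue
--         lines = hunk.splitlines()
--         if i > 0:
--             lines = lines[1:]
--         filtered_lines = [
--             line
--             for line in lines
--             if line.startswith("+") or line.startswith("-") and len(line.strip()) > 1
--         ]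
--         if filtered_lines:
--             processed_hunks.append("\n".join(filtered_lines))
--
--     return "\n".join(processed_hunks)
-- ===== SOURCE B (Python) =====
-- def keep_only_changing_lines(changes: str) -> str:
--     # One flat pass: hunk headers ("@@...") never start with '+'/'-', so the
--     # filter alone reproduces the split-into-hunks/drop-header/join pipeline.
--     return "\n".join(
--         line
--         for line in changes.splitlines()
--         if line.startswith("+") or line.startswith("-") and len(line.strip()) > 1
--     )
-- ===== Notes on version B (the rewrite author's own statement) =====
-- stated objective: simpler
-- what changed: B replaces A's split-into-hunks / per-hunk header-drop / per-hunk join / join-of-joins pipeline by a single flat pass: filter changes.splitlines() with the same line condition and join once (hunk headers never start with '+'/'-', so no hunk grouping is needed).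
import Mathlib
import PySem

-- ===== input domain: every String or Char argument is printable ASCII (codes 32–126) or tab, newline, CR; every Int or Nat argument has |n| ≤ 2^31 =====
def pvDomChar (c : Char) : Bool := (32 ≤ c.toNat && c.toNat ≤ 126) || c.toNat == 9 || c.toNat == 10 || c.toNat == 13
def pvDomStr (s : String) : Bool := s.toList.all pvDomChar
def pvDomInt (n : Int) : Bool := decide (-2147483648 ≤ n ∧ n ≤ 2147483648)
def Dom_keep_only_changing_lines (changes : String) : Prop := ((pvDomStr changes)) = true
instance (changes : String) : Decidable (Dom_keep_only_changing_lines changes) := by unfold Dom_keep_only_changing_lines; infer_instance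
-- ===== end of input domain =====

-- B replaces A's split-into-hunks / drop-header / per-hunk-join pipeline by one flat
-- filter-and-join pass over the lines (simpler decomposition; same return value).

-- ===== PORT A =====
-- A's loop over `enumerate(hunks)`: `i` is the enumerate index, `acc` the processed_hunks list.
def pvALoopA : List (List Char) → Nat → List (List Char) → List (List Char)
  | [], _, acc => acc
  | hunk :: t, i, acc =>
    if (PySem.Chars.strip hunk).isEmpty then pvALoopA t (i + 1) acc   -- if not hunk.strip(): continue
    else
      let lines0 := PySem.Chars.splitlines hunk                       -- lines = hunk.splitlines()
      let lines1 := if 0 < i then PySem.List.slice lines0 (some 1) none else lines0  -- lines = lines[1:]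
      let filtered := lines1.filter (fun line =>                      -- the comprehension's condition
        PySem.Chars.startswith line ['+'] ||
          (PySem.Chars.startswith line ['-'] && decide (1 < (PySem.Chars.strip line).length)))
      if filtered.isEmpty then pvALoopA t (i + 1) acc
      else pvALoopA t (i + 1) (acc ++ [PySem.Chars.join ['\n'] filtered])

def keep_only_changing_lines (changes : String) : String :=
  if changes.toList = [] then ""                                      -- if not changes: return ""
  else
    let hunks := PySem.Chars.splitOn changes.toList ['\n', '@', '@']  -- changes.split("\n@@")
    String.ofList (PySem.Chars.join ['\n'] (pvALoopA hunks 0 []))         -- "\n".join(processed_hunks)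

-- ===== PORT B =====
def keep_only_changing_lines_alt (changes : String) : String :=
  String.ofList (PySem.Chars.join ['\n']
    ((PySem.Chars.splitlines changes.toList).filter (fun line =>
      PySem.Chars.startswith line ['+'] ||
        (PySem.Chars.startswith line ['-'] && decide (1 < (PySem.Chars.strip line).length)))))

-- ===== PRECONDITION & SPEC =====
def Spec_keep_only_changing_lines (changes : String) (out : String) : Prop := out = keep_only_changing_lines_alt changes
instance (changes : String) (out : String) : Decidable (Spec_keep_only_changing_lines changes out) := by unfold Spec_keep_only_changing_lines; infer_instance

-- ===== CLAIM (what is proved, stated in full; the proofs are below) =====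
def Claim_equal_keep_only_changing_lines : Prop := ∀ (changes : String), Dom_keep_only_changing_lines changes → Spec_keep_only_changing_lines changes (keep_only_changing_lines changes)

-- ===== LEMMAS AND PROOFS =====

-- The filter condition shared by both Python sources, as a named predicate.
def pvPred (line : List Char) : Bool :=
  PySem.Chars.startswith line ['+'] ||
    (PySem.Chars.startswith line ['-'] && decide (1 < (PySem.Chars.strip line).length))

-- The line-break predicate of PySem.Chars.splitlines (definitional copy).
def pvIsB (c : Char) : Bool :=
  have n := c.toNat;
  decide (n = 10) || decide (n = 13) || decide (n = 11) || decide (n = 12) || decide (n = 28) || decide (n = 29) ||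
          decide (n = 30) ||
        decide (n = 133) ||
      decide (n = 8232) ||
    decide (n = 8233)

-- Prepend a prefix onto the first element (creating it if there is none).
def pvConsFst (p : List Char) : List (List Char) → List (List Char)
  | [] => [p]
  | x :: xs => (p ++ x) :: xs

-- Accumulator-free form of PySem.Chars.splitlines.
def pvLines : List Char → List (List Char)
  | [] => []
  | '\r' :: '\n' :: rest => [] :: pvLines rest
  | c :: rest => if pvIsB c then [] :: pvLines rest else pvConsFst [c] (pvLines rest)

-- Accumulator-free form of PySem.Chars.splitOn · ['\n','@','@'].
def pvSplit (l : List Char) : List (List Char) :=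
  match l with
  | [] => [[]]
  | c :: rest =>
    if ['\n', '@', '@'].isPrefixOf (c :: rest) then [] :: pvSplit (rest.drop 2)
    else pvConsFst [c] (pvSplit rest)
termination_by l.length
decreasing_by all_goals simp

-- pvLines of a newline-terminated string.
def pvLinesT (a : List Char) : List (List Char) := pvLines (a ++ ['\n'])

-- What A computes per hunk (flag = "i > 0"), flattened.
def pvGs : List (List Char) → Bool → List (List (List Char))
  | [], _ => []
  | h :: t, flag => (if flag then (pvLines h).drop 1 else pvLines h).filter pvPred :: pvGs t true


-- conditional equation lemmas for the overlapping-pattern matches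
theorem pvLines_cons (c : Char) (rest : List Char)
    (h1 : ∀ r, c = '\r' → rest = '\n' :: r → False) :
    pvLines (c :: rest) = if pvIsB c then [] :: pvLines rest else pvConsFst [c] (pvLines rest) := by
  rw [pvLines]
  exact h1

theorem pvGo_nil (cur : List Char) (acc : List (List Char)) :
    PySem.Chars.splitlines.go pvIsB [] cur acc =
      if cur.isEmpty then acc.reverse else (cur.reverse :: acc).reverse := rfl

theorem pvGo_rn (rest cur : List Char) (acc : List (List Char)) :
    PySem.Chars.splitlines.go pvIsB ('\r' :: '\n' :: rest) cur acc =
      PySem.Chars.splitlines.go pvIsB rest [] (cur.reverse :: acc) := rfl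

theorem pvGo_cons (c : Char) (rest cur : List Char) (acc : List (List Char))
    (h1 : ∀ r, c = '\r' → rest = '\n' :: r → False) :
    PySem.Chars.splitlines.go pvIsB (c :: rest) cur acc =
      if pvIsB c then PySem.Chars.splitlines.go pvIsB rest [] (cur.reverse :: acc)
      else PySem.Chars.splitlines.go pvIsB rest (c :: cur) acc := by
  rw [PySem.Chars.splitlines.go]
  exact h1


-- pvConsFst basics
theorem pvConsFst_ne_nil (p : List Char) (xs : List (List Char)) : pvConsFst p xs ≠ [] := by
  cases xs <;> simp [pvConsFst]

theorem pvConsFst_append (p q : List Char) (xs : List (List Char)) :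
    pvConsFst (p ++ q) xs = pvConsFst p (pvConsFst q xs) := by
  cases xs <;> simp [pvConsFst]

theorem pvConsFst_nil_of_ne (xs : List (List Char)) (h : xs ≠ []) : pvConsFst [] xs = xs := by
  cases xs <;> simp [pvConsFst] at *

theorem pvConsFst_append_left (p : List Char) (xs ys : List (List Char)) (h : xs ≠ []) :
    pvConsFst p (xs ++ ys) = pvConsFst p xs ++ ys := by
  cases xs <;> simp [pvConsFst] at *

theorem pvSplit_ne_nil (l : List Char) : pvSplit l ≠ [] := by
  cases l with
  | nil => simp [pvSplit]
  | cons c rest => rw [pvSplit]; split <;> simp [pvConsFst_ne_nil]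

theorem pvLines_ne_nil (s : List Char) (h : s ≠ []) : pvLines s ≠ [] := by
  induction s using pvLines.induct with
  | case1 => simp at h
  | case2 rest ih => simp [pvLines]
  | case3 c rest h1 hB ih => rw [pvLines_cons c rest h1]; simp [hB]
  | case4 c rest h1 hB ih => rw [pvLines_cons c rest h1]; simp [hB, pvConsFst_ne_nil]

theorem pvLinesT_ne_nil (a : List Char) : pvLinesT a ≠ [] := by
  exact pvLines_ne_nil _ (by simp)

-- closed form of PySem.Chars.splitlines.go
theorem pvLinesGo (s : List Char) : ∀ (cur : List Char) (acc : List (List Char)),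
    PySem.Chars.splitlines.go pvIsB s cur acc =
      acc.reverse ++ (if s.isEmpty && cur.isEmpty then [] else pvConsFst cur.reverse (pvLines s)) := by
  induction s using pvLines.induct with
  | case1 =>
    intro cur acc
    rw [pvGo_nil]
    by_cases h : cur = [] <;> simp [h, pvLines, pvConsFst]
  | case2 rest ih =>
    intro cur acc
    have h2 : pvLines ('\r' :: '\n' :: rest) = [] :: pvLines rest := by simp [pvLines]
    rw [pvGo_rn, ih, h2]
    cases hq : pvLines rest with
    | nil =>
      have hr : rest = [] := by by_contra hr; exact pvLines_ne_nil rest hr hq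
      subst hr; simp [pvConsFst]
    | cons x xs =>
      have hr : rest ≠ [] := by intro h; subst h; simp [pvLines] at hq
      simp [hr, pvConsFst]
  | case3 c rest h1 hB ih =>
    intro cur acc
    rw [pvGo_cons c rest cur acc h1, pvLines_cons c rest h1, ih]
    simp only [hB, if_true]
    cases hq : pvLines rest with
    | nil =>
      have hr : rest = [] := by by_contra hr; exact pvLines_ne_nil rest hr hq
      subst hr; simp [pvConsFst]
    | cons x xs =>
      have hr : rest ≠ [] := by intro h; subst h; simp [pvLines] at hq
      simp [hr, pvConsFst]
  | case4 c rest h1 hB ih =>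
    intro cur acc
    have hBf : pvIsB c = false := by simpa using hB
    rw [pvGo_cons c rest cur acc h1, pvLines_cons c rest h1, hBf]
    simp only [Bool.false_eq_true, if_false]
    rw [ih, List.reverse_cons, pvConsFst_append]
    simp

theorem pvSplitlines_eq (s : List Char) : PySem.Chars.splitlines s = pvLines s := by
  have h : PySem.Chars.splitlines s = PySem.Chars.splitlines.go pvIsB s [] [] := rfl
  rw [h, pvLinesGo]
  by_cases hs : s = []
  · subst hs; simp [pvLines]
  · simp [hs, pvConsFst_nil_of_ne _ (pvLines_ne_nil s hs)]

-- closed form of PySem.Chars.splitOn.go for sep = "\n@@"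
theorem pvSplitGo (fuel : Nat) : ∀ (l cur : List Char) (acc : List (List Char)), l.length < fuel →
    PySem.Chars.splitOn.go ['\n', '@', '@'] fuel l cur acc =
      acc.reverse ++ pvConsFst cur.reverse (pvSplit l) := by
  induction fuel with
  | zero => intro l cur acc h; omega
  | succ fuel ih =>
    intro l cur acc h
    cases l with
    | nil =>
      show (cur.reverse :: acc).reverse = _
      simp [pvSplit, pvConsFst]
    | cons c rest =>
      show (if List.isPrefixOf ['\n', '@', '@'] (c :: rest) then
              PySem.Chars.splitOn.go ['\n', '@', '@'] fuel ((c :: rest).drop 3) [] (cur.reverse :: acc)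
            else PySem.Chars.splitOn.go ['\n', '@', '@'] fuel rest (c :: cur) acc) = _
      rw [pvSplit]
      by_cases hp : List.isPrefixOf ['\n', '@', '@'] (c :: rest)
      · rw [if_pos hp, if_pos hp, ih _ _ _ (by simp at h ⊢; omega)]
        have hne := pvSplit_ne_nil (rest.drop 2)
        cases hq : pvSplit (rest.drop 2) with
        | nil => exact absurd hq hne
        | cons x xs => simp [hq, pvConsFst]
      · rw [if_neg hp, if_neg hp, ih _ _ _ (by simp at h ⊢; omega)]
        rw [List.reverse_cons, pvConsFst_append]

theorem pvSplitOn_eq (s : List Char) : PySem.Chars.splitOn s ['\n', '@', '@'] = pvSplit s := by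
  have h : PySem.Chars.splitOn s ['\n', '@', '@'] =
      PySem.Chars.splitOn.go ['\n', '@', '@'] (s.length + 1) s [] [] := rfl
  rw [h, pvSplitGo _ _ _ _ (by omega)]
  simp [pvConsFst_nil_of_ne _ (pvSplit_ne_nil s)]

-- appending a newline-separated tail splits the lines
theorem pvLines_append (a b : List Char) :
    pvLines (a ++ '\n' :: b) = pvLinesT a ++ pvLines b := by
  induction a using pvLines.induct with
  | case1 =>
    simp only [List.nil_append]
    rw [pvLines_cons '\n' b (by intro r h; simp at h)]
    simp [pvIsB, pvLinesT, pvLines]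
  | case2 rest ih =>
    show pvLines ('\r' :: '\n' :: (rest ++ '\n' :: b)) = _
    rw [pvLines]
    rw [ih]
    show _ = pvLines ('\r' :: '\n' :: (rest ++ ['\n'])) ++ pvLines b
    rw [pvLines]
    simp [pvLinesT]
  | case3 c rest h1 hB ih =>
    by_cases hc : c = '\r' ∧ rest = []
    · obtain ⟨hc1, hc2⟩ := hc
      subst hc1; subst hc2
      show pvLines ('\r' :: '\n' :: b) = _
      rw [pvLines]
      show _ = pvLines ['\r', '\n'] ++ pvLines b
      rw [pvLines]
      simp [pvLines]
    · have hrest : c = '\r' → ∃ d t, rest = d :: t ∧ d ≠ '\n' := by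
        intro hcr
        cases rest with
        | nil => exact absurd ⟨hcr, rfl⟩ hc
        | cons d t =>
          refine ⟨d, t, rfl, ?_⟩
          intro hd; subst hd; exact h1 t hcr rfl
      have hE : ∀ (l : List Char), ∀ r, c = '\r' → rest ++ l = '\n' :: r → False := by
        intro l r hcr habs
        obtain ⟨d, t, hre, hd⟩ := hrest hcr
        subst hre
        simp only [List.cons_append, List.cons.injEq] at habs
        exact hd habs.1
      show pvLines (c :: (rest ++ '\n' :: b)) = _
      rw [pvLines_cons c _ (hE _), ih]
      simp only [hB, if_true]
      show _ = pvLines (c :: (rest ++ ['\n'])) ++ pvLines b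
      rw [pvLines_cons c _ (hE _)]
      simp only [hB, if_true]
      simp [pvLinesT]
  | case4 c rest h1 hB ih =>
    have hcr : c ≠ '\r' := by
      intro hc; subst hc; exact hB (by decide)
    have hE : ∀ (l : List Char), ∀ r, c = '\r' → l = '\n' :: r → False := by
      intro l r h; exact absurd h hcr
    show pvLines (c :: (rest ++ '\n' :: b)) = _
    rw [pvLines_cons c _ (hE _), ih]
    simp only [hB, if_false, Bool.false_eq_true]
    rw [pvConsFst_append_left _ _ _ (pvLinesT_ne_nil rest)]
    show _ = pvLines (c :: (rest ++ ['\n'])) ++ pvLines b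
    rw [pvLines_cons c _ (hE _)]
    simp only [hB, if_false, Bool.false_eq_true]
    simp [pvLinesT]

-- a terminating newline adds at most a trailing empty line
theorem pvLinesT_struct (a : List Char) :
    pvLinesT a = pvLines a ∨ pvLinesT a = pvLines a ++ [[]] := by
  induction a using pvLines.induct with
  | case1 => right; simp [pvLinesT, pvLines, pvIsB]
  | case2 rest ih =>
    have h2 : pvLines ('\r' :: '\n' :: rest) = [] :: pvLines rest := by simp [pvLines]
    have h3 : pvLinesT ('\r' :: '\n' :: rest) = [] :: pvLinesT rest := by
      show pvLines ('\r' :: '\n' :: (rest ++ ['\n'])) = _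
      simp [pvLines, pvLinesT]
    rw [h2, h3]
    rcases ih with h | h <;> [left; right] <;> simp [h]
  | case3 c rest h1 hB ih =>
    by_cases hc : c = '\r' ∧ rest = []
    · obtain ⟨hc1, hc2⟩ := hc
      subst hc1; subst hc2
      left
      show pvLines ['\r', '\n'] = pvLines ['\r']
      simp [pvLines, pvIsB]
    · have hrest : c = '\r' → ∃ d t, rest = d :: t ∧ d ≠ '\n' := by
        intro hcr
        cases rest with
        | nil => exact absurd ⟨hcr, rfl⟩ hc
        | cons d t =>
          refine ⟨d, t, rfl, ?_⟩
          intro hd; subst hd; exact h1 t hcr rfl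
      have hE : ∀ (l : List Char), ∀ r, c = '\r' → rest ++ l = '\n' :: r → False := by
        intro l r hcr habs
        obtain ⟨d, t, hre, hd⟩ := hrest hcr
        subst hre
        simp only [List.cons_append, List.cons.injEq] at habs
        exact hd habs.1
      have h2 : pvLinesT (c :: rest) = [] :: pvLinesT rest := by
        show pvLines (c :: (rest ++ ['\n'])) = _
        rw [pvLines_cons c _ (hE _)]
        simp [hB, pvLinesT]
      rw [h2, pvLines_cons c rest h1]
      simp only [hB, if_true]
      rcases ih with h | h <;> [left; right] <;> simp [h]
  | case4 c rest h1 hB ih =>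
    have hcr : c ≠ '\r' := by
      intro hc; subst hc; exact hB (by decide)
    have hE : ∀ (l : List Char), ∀ r, c = '\r' → l = '\n' :: r → False := by
      intro l r h; exact absurd h hcr
    have hBf : pvIsB c = false := by simpa using hB
    have h2 : pvLinesT (c :: rest) = pvConsFst [c] (pvLinesT rest) := by
      show pvLines (c :: (rest ++ ['\n'])) = _
      rw [pvLines_cons c _ (hE _)]
      simp [hBf, pvLinesT]
    rw [h2, pvLines_cons c rest h1]
    simp only [hBf, Bool.false_eq_true, if_false]
    rcases ih with h | h
    · left; rw [h]
    · rw [h]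
      cases hq : pvLines rest with
      | nil => left; simp [pvConsFst]
      | cons x xs => right; simp [pvConsFst]

-- pvPred facts
theorem pvPred_nil : pvPred [] = false := by decide

theorem pvPred_at (x : List Char) : pvPred ('@' :: x) = false := by
  simp [pvPred, PySem.Chars.startswith, List.isPrefixOf]

-- filtering a header-prefixed line list = filtering the tail
theorem pvFilter_consFst_at (ls : List (List Char)) :
    (pvConsFst ['@', '@'] ls).filter pvPred = (ls.drop 1).filter pvPred := by
  cases ls <;> simp [pvConsFst, pvPred_at]

theorem pvFilter_T (a : List Char) :
    (pvLinesT a).filter pvPred = (pvLines a).filter pvPred := by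
  rcases pvLinesT_struct a with h | h
  · rw [h]
  · rw [h]; simp [pvPred_nil]

theorem pvFilter_T_drop (a : List Char) :
    ((pvLinesT a).drop 1).filter pvPred = ((pvLines a).drop 1).filter pvPred := by
  rcases pvLinesT_struct a with h | h
  · rw [h]
  · rw [h]
    cases h' : pvLines a with
    | nil => simp
    | cons x xs => simp [pvPred_nil]

-- all characters of a line of pvLines h occur in h
theorem pvLines_chars (h : List Char) : ∀ line ∈ pvLines h, ∀ c ∈ line, c ∈ h := by
  induction h using pvLines.induct with
  | case1 => simp [pvLines]
  | case2 rest ih =>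
    have h2 : pvLines ('\r' :: '\n' :: rest) = [] :: pvLines rest := by simp [pvLines]
    rw [h2]
    intro line hline c hc
    rcases hline with _ | hline
    · simp at hc
    · simp [ih line (by assumption) c hc]
  | case3 c0 rest h1 hB ih =>
    rw [pvLines_cons c0 rest h1]
    simp only [hB, if_true]
    intro line hline c hc
    rcases hline with _ | hline
    · simp at hc
    · simp [ih line (by assumption) c hc]
  | case4 c0 rest h1 hB ih =>
    have hBf : pvIsB c0 = false := by simpa using hB
    rw [pvLines_cons c0 rest h1]
    simp only [hBf, Bool.false_eq_true, if_false]
    intro line hline c hc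
    cases hq : pvLines rest with
    | nil =>
      rw [hq] at hline
      simp only [pvConsFst, List.mem_singleton] at hline
      subst hline
      simp at hc
      simp [hc]
    | cons x xs =>
      rw [hq] at hline
      simp only [pvConsFst, List.mem_cons] at hline
      rcases hline with hline | hline
      · subst hline
        simp at hc
        rcases hc with hc | hc
        · simp [hc]
        · have := ih x (by rw [hq]; simp) c hc
          simp [this]
      · have := ih line (by rw [hq]; simp [hline]) c hc
        simp [this]

-- a true pvPred line starts with '+' or '-'
theorem pvPred_head (line : List Char) (h : pvPred line = true) :
    ∃ t, line = '+' :: t ∨ line = '-' :: t := by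
  simp only [pvPred, Bool.or_eq_true, Bool.and_eq_true] at h
  rcases h with h | ⟨h, -⟩ <;>
  · rw [PySem.Chars.startswith_iff] at h
    obtain ⟨t, ht⟩ := h
    exact ⟨t, by rw [← ht]; simp⟩

-- an all-whitespace string (strip = "") has no line satisfying pvPred
theorem pvStrip_space (h : List Char) (hs : (PySem.Chars.strip h).isEmpty = true) :
    ∀ c ∈ h, PySem.Chars.isspace c = true := by
  simp only [List.isEmpty_iff] at hs
  have h1 : PySem.Chars.lstrip h = [] := by
    have h2 := hs
    simp only [PySem.Chars.strip, PySem.Chars.rstrip, List.reverse_eq_nil_iff] at h2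
    rw [List.dropWhile_eq_nil_iff] at h2
    cases hq : PySem.Chars.lstrip h with
    | nil => rfl
    | cons d t =>
      have hd : ¬ PySem.Chars.isspace d = true := by
        have := List.head?_dropWhile_not (fun c => PySem.Chars.isspace c) h
        simp only [PySem.Chars.lstrip] at hq
        rw [hq] at this
        simpa using this
      exact absurd (h2 d (by rw [hq]; simp)) hd
  intro c hc
  have := List.takeWhile_append_dropWhile (p := fun c => PySem.Chars.isspace c) (l := h)
  simp only [PySem.Chars.lstrip] at h1
  rw [h1, List.append_nil] at this
  rw [← this] at hc
  exact List.mem_takeWhile_imp hc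

theorem pvStrip_empty_filter (h : List Char) (hs : (PySem.Chars.strip h).isEmpty = true)
    (flag : Bool) : (if flag then (pvLines h).drop 1 else pvLines h).filter pvPred = [] := by
  rw [List.filter_eq_nil_iff]
  intro line hline hp
  have hline' : line ∈ pvLines h := by
    cases flag with
    | false => simpa using hline
    | true =>
      have : line ∈ (pvLines h).drop 1 := by simpa [List.drop_one] using hline
      exact List.mem_of_mem_drop this
  obtain ⟨t, ht⟩ := pvPred_head line hp
  rcases ht with ht | ht <;> subst ht
  · have := pvStrip_space h hs '+' (pvLines_chars h _ hline' '+' (by simp))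
    simp [PySem.Chars.isspace] at this
  · have := pvStrip_space h hs '-' (pvLines_chars h _ hline' '-' (by simp))
    simp [PySem.Chars.isspace] at this

-- lines[1:] is drop 1
theorem pvSlice1 (l : List (List Char)) : PySem.List.slice l (some 1) none = l.drop 1 := by
  cases l with
  | nil => rfl
  | cons x xs => simp [PySem.List.slice, PySem.List.clampIdx]

-- the comprehension condition of both ports is pvPred
theorem pvPred_eq : (fun line => PySem.Chars.startswith line ['+'] ||
    (PySem.Chars.startswith line ['-'] && decide (1 < (PySem.Chars.strip line).length))) = pvPred := rfl

-- the A loop in terms of pvGs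
theorem pvALoopA_eq (hs : List (List Char)) : ∀ (i : Nat) (acc : List (List Char)),
    pvALoopA hs i acc =
      acc ++ ((pvGs hs (decide (0 < i))).filter (fun g => !g.isEmpty)).map (PySem.Chars.join ['\n']) := by
  induction hs with
  | nil => intro i acc; simp [pvALoopA, pvGs]
  | cons h t ih =>
    intro i acc
    rw [pvALoopA, pvGs]
    by_cases h1 : (PySem.Chars.strip h).isEmpty
    · rw [if_pos h1, ih, pvStrip_empty_filter h h1 (decide (0 < i))]
      simp
    · rw [if_neg h1]
      simp only [pvSplitlines_eq, pvSlice1, pvPred_eq]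
      have hif : (if 0 < i then (pvLines h).drop 1 else pvLines h)
          = (if decide (0 < i) = true then (pvLines h).drop 1 else pvLines h) := by
        by_cases hi : 0 < i <;> simp [hi]
      rw [hif]
      by_cases h2 : ((if decide (0 < i) = true then (pvLines h).drop 1 else pvLines h).filter pvPred).isEmpty
      · rw [if_pos h2, ih]
        simp only [List.isEmpty_iff] at h2
        have h2' : List.filter pvPred (if 0 < i then (pvLines h).tail else pvLines h) = [] := by
          by_cases hi : 0 < i <;> simpa [hi, List.drop_one] using h2
        simp [h2']
      · rw [if_neg h2, ih]
        simp only [List.isEmpty_iff] at h2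
        have h2' : ¬ List.filter pvPred (if 0 < i then (pvLines h).tail else pvLines h) = [] := by
          by_cases hi : 0 < i <;> simpa [hi, List.drop_one] using h2
        simp [h2', List.drop_one]

-- joining nonempty pieces
theorem pvJoin_append (l1 l2 : List (List Char)) (h1 : l1 ≠ []) (h2 : l2 ≠ []) :
    PySem.Chars.join ['\n'] (l1 ++ l2) =
      PySem.Chars.join ['\n'] l1 ++ ['\n'] ++ PySem.Chars.join ['\n'] l2 := by
  induction l1 with
  | nil => exact absurd rfl h1
  | cons x l1' ih =>
    cases l1' with
    | nil =>
      cases l2 with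
      | nil => exact absurd rfl h2
      | cons y t =>
        rw [List.singleton_append, PySem.Chars.join_cons_cons, PySem.Chars.join_singleton]
    | cons w l1'' =>
      have hih : PySem.Chars.join ['\n'] (w :: (l1'' ++ l2)) =
          PySem.Chars.join ['\n'] (w :: l1'') ++ ['\n'] ++ PySem.Chars.join ['\n'] l2 := by
        simpa using ih (by simp)
      rw [show ((x :: w :: l1'') ++ l2) = x :: (w :: (l1'' ++ l2)) by simp]
      rw [PySem.Chars.join_cons_cons, hih, PySem.Chars.join_cons_cons]
      simp

-- joining per-hunk joins = joining the flattened lines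
theorem pvJoin_flatten (gs : List (List (List Char))) :
    PySem.Chars.join ['\n'] ((gs.filter (fun g => !g.isEmpty)).map (PySem.Chars.join ['\n'])) =
      PySem.Chars.join ['\n'] gs.flatten := by
  induction gs with
  | nil => rfl
  | cons g rest ih =>
    by_cases hg : g = []
    · simp [hg, ih]
    · by_cases hrest : rest.flatten = []
      · have hf : (rest.filter (fun g => !g.isEmpty)) = [] := by
          rw [List.filter_eq_nil_iff]
          intro a ha
          have := List.flatten_eq_nil_iff.mp hrest a ha
          simp [this]
        simp only [List.flatten_cons, hrest, List.append_nil, List.filter_cons]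
        rw [if_pos (by simp [hg]), hf]
        simp [PySem.Chars.join_singleton]
      · have hf : (rest.filter (fun g => !g.isEmpty)) ≠ [] := by
          intro hnil
          apply hrest
          rw [List.flatten_eq_nil_iff]
          intro l hl
          by_contra hlne
          have : l ∈ rest.filter (fun g => !g.isEmpty) := by
            rw [List.mem_filter]
            exact ⟨hl, by simp [hlne]⟩
          rw [hnil] at this
          simp at this
        simp only [List.flatten_cons, List.filter_cons]
        rw [if_pos (by simp [hg])]
        cases hm : (rest.filter (fun g => !g.isEmpty)).map (PySem.Chars.join ['\n']) with
        | nil => rw [List.map_eq_nil_iff] at hm; exact absurd hm hf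
        | cons m M =>
          rw [List.map_cons, hm, PySem.Chars.join_cons_cons, ← hm, ih,
              pvJoin_append g rest.flatten hg hrest]

-- pvSplit on a string without the separator
theorem pvSplit_nosep (s : List Char) (h : ¬ ['\n', '@', '@'] <:+: s) : pvSplit s = [s] := by
  induction s with
  | nil => simp [pvSplit]
  | cons c rest ih =>
    rw [pvSplit]
    rw [if_neg (by
      intro hp
      exact h (List.isPrefixOf_iff_prefix.mp hp).isInfix)]
    rw [ih (fun hi => h (List.infix_cons hi))]
    simp [pvConsFst]

-- pvSplit at the first occurrence of the separator
theorem pvSplit_min (a b : List Char)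
    (h : ∀ j < a.length, ¬ ['\n', '@', '@'] <+: (a ++ '\n' :: '@' :: '@' :: b).drop j) :
    pvSplit (a ++ '\n' :: '@' :: '@' :: b) = a :: pvSplit b := by
  induction a with
  | nil =>
    rw [List.nil_append, pvSplit]
    rw [if_pos (by simp)]
    simp
  | cons c a' ih =>
    have h0 : ¬ ['\n', '@', '@'] <+: (c :: (a' ++ '\n' :: '@' :: '@' :: b)) := by
      have := h 0 (by simp)
      simpa using this
    rw [List.cons_append, pvSplit]
    rw [if_neg (fun hp => h0 (List.isPrefixOf_iff_prefix.mp hp))]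
    rw [ih (by
      intro j hj
      have := h (j + 1) (by simp; omega)
      simpa using this)]
    simp [pvConsFst]

-- pvLines of "@@" ++ b
theorem pvLines_at (b : List Char) :
    pvLines ('@' :: '@' :: b) = pvConsFst ['@', '@'] (pvLines b) := by
  have hE : ∀ (l : List Char), ∀ r, '@' = '\r' → l = '\n' :: r → False := by
    intro l r h; exact absurd h (by decide)
  rw [pvLines_cons '@' _ (hE _), pvLines_cons '@' _ (hE _)]
  have hBf : pvIsB '@' = false := by decide
  rw [hBf]
  simp only [Bool.false_eq_true, if_false]
  rw [← pvConsFst_append]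
  rfl

-- MAIN: the flattened per-hunk filtered lines are the filtered flat lines
theorem pvMain (n : Nat) : ∀ (s : List Char), s.length ≤ n → ∀ (flag : Bool),
    (pvGs (pvSplit s) flag).flatten =
      (if flag then pvConsFst ['@', '@'] (pvLines s) else pvLines s).filter pvPred := by
  induction n with
  | zero =>
    intro s hs flag
    have h0 : s = [] := by cases s with | nil => rfl | cons c t => simp at hs
    subst h0
    cases flag <;> simp [pvSplit, pvGs, pvLines, pvConsFst, pvPred_at]
  | succ n ih =>
    intro s hs flag
    by_cases hinf : ['\n', '@', '@'] <:+: s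
    · -- split at the first occurrence, found by Chars.find
      have hk0 : 0 ≤ PySem.Chars.find s ['\n', '@', '@'] := (PySem.Chars.find_nonneg_iff s _).mpr hinf
      obtain ⟨hpre, hmin⟩ := PySem.Chars.find_spec (s := s) (sub := ['\n', '@', '@']) hk0
      set k := (PySem.Chars.find s ['\n', '@', '@']).toNat with hkdef
      obtain ⟨t, ht⟩ := hpre
      have hks : k ≤ s.length := by
        have := PySem.Chars.find_le_length s ['\n', '@', '@']
        omega
      have hsplit : s = s.take k ++ '\n' :: '@' :: '@' :: t := by
        conv_lhs => rw [← List.take_append_drop k s]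
        rw [← ht]
        rfl
      have hlen : (s.take k).length = k := by simp [hks]
      have hminA : ∀ j < (s.take k).length, ¬ ['\n', '@', '@'] <+: ((s.take k) ++ '\n' :: '@' :: '@' :: t).drop j := by
        rw [hlen]
        intro j hj
        rw [← hsplit]
        exact hmin j hj
      have hblen : t.length ≤ n := by
        have := congrArg List.length hsplit
        simp [hlen] at this
        omega
      rw [hsplit, pvSplit_min _ _ hminA, pvGs, List.flatten_cons,
          ih t hblen true, pvLines_append, pvLines_at]
      cases flag with
      | false =>
        simp only [if_false, Bool.false_eq_true, if_true]
        rw [List.filter_append, pvFilter_T]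
      | true =>
        simp only [if_true]
        rw [pvConsFst_append_left _ _ _ (pvLinesT_ne_nil (s.take k)), List.filter_append,
            pvFilter_consFst_at, pvFilter_consFst_at, pvFilter_T_drop]
    · rw [pvSplit_nosep s hinf]
      cases flag with
      | false => simp [pvGs]
      | true =>
        simp only [pvGs, if_true, List.flatten_cons, List.flatten_nil, List.append_nil]
        rw [pvFilter_consFst_at]

theorem keep_only_changing_lines_spec : Claim_equal_keep_only_changing_lines := by
  intro changes _
  unfold Spec_keep_only_changing_lines keep_only_changing_lines keep_only_changing_lines_alt
  by_cases h : changes.toList = []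
  · rw [if_pos h, h, pvSplitlines_eq]
    simp [pvLines, PySem.Chars.join, List.intercalate]
  · rw [if_neg h, pvSplitOn_eq]
    show String.ofList (PySem.Chars.join ['\n'] (pvALoopA (pvSplit changes.toList) 0 [])) = _
    rw [pvALoopA_eq, pvSplitlines_eq, pvPred_eq]
    simp only [List.nil_append]
    rw [show (decide (0 < 0)) = false from rfl]
    rw [pvJoin_flatten, pvMain changes.toList.length changes.toList (Nat.le_refl _) false]
    simp
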